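-- pv_equiv track=rewrite | github.com/Vishal8519/python-task | questionno1.py | minimum_time_to_send_groups
-- ===== SOURCE A (Python) =====
-- def minimum_time_to_send_groups(groups, planes):
--     groups.sort(reverse=True)
--     planes.sort(reverse=True)
--     time = 0
--
--     while groups:
--         if not planes:
--             break
--
--         group = groups[0]
--         plane = planes[0]
--
--         time += max(group, plane)
--         groups[0] -= min(group, plane)
--         planes[0] -= min(group, plane)
--
--         if groups[0] == 0:
--             groups.pop(0)
--
--         if planes[0] == 0:
--             planes.pop(0)
--
--     return time
-- ===== SOURCE B (Python) =====
-- def minimum_time_to_send_groups(groups, planes):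
--     gs = sorted(groups, reverse=True)
--     ps = sorted(planes, reverse=True)
--     if not gs or not ps:
--         return 0
--     time = 0
--     i = j = 0
--     g, p = gs[0], ps[0]
--     while True:
--         time += max(g, p)
--         m = min(g, p)
--         g -= m
--         p -= m
--         if g == 0:
--             i += 1
--             if i == len(gs):
--                 break
--             g = gs[i]
--         if p == 0:
--             j += 1
--             if j == len(ps):
--                 break
--             p = ps[j]
--     return time
-- ===== Notes on version B (the rewrite author's own statement) =====
-- stated objective: faster
-- what changed: Replaces A's in-place drain with repeated pop(0) on the mutated lists by a two-pointer merge over sorted copies that keeps the current residual group/plane in plain variables, so no list element is ever rewritten or shifted.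
import Mathlib
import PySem

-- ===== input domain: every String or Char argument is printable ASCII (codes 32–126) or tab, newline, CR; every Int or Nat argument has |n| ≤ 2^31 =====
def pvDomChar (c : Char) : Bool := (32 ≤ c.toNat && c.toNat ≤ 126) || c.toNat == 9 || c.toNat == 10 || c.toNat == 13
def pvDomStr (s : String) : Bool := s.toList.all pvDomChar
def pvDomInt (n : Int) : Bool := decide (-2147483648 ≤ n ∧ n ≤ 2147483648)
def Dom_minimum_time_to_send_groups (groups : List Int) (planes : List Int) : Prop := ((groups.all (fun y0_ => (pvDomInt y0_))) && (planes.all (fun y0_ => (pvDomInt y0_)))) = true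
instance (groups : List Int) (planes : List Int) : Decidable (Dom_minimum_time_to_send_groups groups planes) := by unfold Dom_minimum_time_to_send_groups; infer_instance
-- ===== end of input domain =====

-- B replaces A's O(n^2) pop(0) draining loop by an index-based two-pointer merge over
-- sorted copies carrying the current residuals in variables (O(n log n)); return value only:
-- A sorts and pops its argument lists in place, B leaves them untouched.

-- ===== PORT A =====
-- A's while loop: state is the two (mutated) lists and the accumulated time;
-- the head is overwritten with the residual and popped when it reaches 0.
def pvLoopA : List Int → List Int → Int → Int
  | [], _, time => time
  | _ :: _, [], time => time
  | group :: gs, plane :: ps, time =>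
    let time := time + max group plane
    let g' := group - min group plane
    let p' := plane - min group plane
    let groups' := if g' = 0 then gs else g' :: gs
    let planes' := if p' = 0 then ps else p' :: ps
    pvLoopA groups' planes' time
termination_by gs ps _ => gs.length + ps.length
decreasing_by
  have _h : group - min group plane = 0 ∨ plane - min group plane = 0 := by omega
  split_ifs <;> simp [List.length_cons] <;> omega

def minimum_time_to_send_groups (groups : List Int) (planes : List Int) : Int :=
  pvLoopA (PySem.List.sorted groups (fun x => x) true)
          (PySem.List.sorted planes (fun x => x) true) 0

-- ===== PORT B =====
-- B's while True loop: current residuals g, p in variables; "i += 1; g = gs[i]"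
-- is transcribed as moving to the next element of the remaining list
-- (index == len(gs) ↔ the remaining list is empty).
def pvLoopB (g : Int) (gs : List Int) (p : Int) (ps : List Int) (time : Int) : Int :=
    let time := time + max g p
    let m := min g p
    let g' := g - m
    let p' := p - m
    if g' = 0 then
      match gs with
      | [] => time
      | g2 :: gs' =>
        if p' = 0 then
          match ps with
          | [] => time
          | p2 :: ps' => pvLoopB g2 gs' p2 ps' time
        else pvLoopB g2 gs' p' ps time
    else
      match ps with
      | [] => time
      | p2 :: ps' => pvLoopB g' gs p2 ps' time
termination_by gs.length + ps.length
decreasing_by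
  all_goals simp [List.length_cons] <;> omega

def minimum_time_to_send_groups_alt (groups : List Int) (planes : List Int) : Int :=
  let gs := PySem.List.sorted groups (fun x => x) true
  let ps := PySem.List.sorted planes (fun x => x) true
  match gs, ps with
  | [], _ => 0
  | _ :: _, [] => 0
  | g :: gs', p :: ps' => pvLoopB g gs' p ps' 0

-- ===== PRECONDITION & SPEC =====
def Spec_minimum_time_to_send_groups (groups : List Int) (planes : List Int) (out : Int) : Prop := out = minimum_time_to_send_groups_alt groups planes
instance (groups : List Int) (planes : List Int) (out : Int) : Decidable (Spec_minimum_time_to_send_groups groups planes out) := by unfold Spec_minimum_time_to_send_groups; infer_instance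

-- ===== CLAIM (what is proved, stated in full; the proofs are below) =====
def Claim_equal_minimum_time_to_send_groups : Prop := ∀ (groups : List Int) (planes : List Int), Dom_minimum_time_to_send_groups groups planes → Spec_minimum_time_to_send_groups groups planes (minimum_time_to_send_groups groups planes)

-- ===== LEMMAS AND PROOFS =====
theorem pvLoopA_eq_pvLoopB (n : Nat) :
    ∀ (g : Int) (gs : List Int) (p : Int) (ps : List Int) (t : Int),
      gs.length + ps.length ≤ n →
      pvLoopA (g :: gs) (p :: ps) t = pvLoopB g gs p ps t := by
  induction n with
  | zero =>
    intro g gs p ps t h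
    have hg : gs = [] := by cases gs <;> simp_all
    have hp : ps = [] := by cases ps <;> simp_all
    subst hg; subst hp
    rw [pvLoopA, pvLoopB.eq_def]
    by_cases h1 : g - min g p = 0 <;> by_cases h2 : p - min g p = 0 <;>
      simp [pvLoopA, h1, h2] <;> omega
  | succ n ih =>
    intro g gs p ps t h
    rw [pvLoopA, pvLoopB.eq_def]
    by_cases h1 : g - min g p = 0
    · by_cases h2 : p - min g p = 0
      · cases gs with
        | nil => simp [pvLoopA, h1, h2]
        | cons g2 gs' =>
          cases ps with
          | nil => simp [pvLoopA, h1, h2]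
          | cons p2 ps' =>
            simp only [h1, h2]
            exact ih g2 gs' p2 ps' _ (by simp at h ⊢; omega)
      · cases gs with
        | nil => simp [pvLoopA, h1, h2]
        | cons g2 gs' =>
          simp only [h1]
          simp only [if_neg h2]
          exact ih g2 gs' (p - min g p) ps _ (by simp at h ⊢; omega)
    · have h2 : p - min g p = 0 := by omega
      cases ps with
      | nil => simp [pvLoopA, h1, h2]
      | cons p2 ps' =>
        simp only [h2]
        simp only [if_neg h1]
        exact ih (g - min g p) gs p2 ps' _ (by simp at h ⊢; omega)

-- ===== VERDICT (by name: the statement is the Claim_ definition above) =====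
theorem minimum_time_to_send_groups_spec : Claim_equal_minimum_time_to_send_groups := by
  intro groups planes _
  unfold Spec_minimum_time_to_send_groups minimum_time_to_send_groups minimum_time_to_send_groups_alt
  cases hgs : PySem.List.sorted groups (fun x => x) true with
  | nil => simp [pvLoopA]
  | cons g gs' =>
    cases hps : PySem.List.sorted planes (fun x => x) true with
    | nil => simp [pvLoopA]
    | cons p ps' =>
      exact pvLoopA_eq_pvLoopB (gs'.length + ps'.length) g gs' p ps' 0 le_rfl
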